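-- pv_equiv track=rewrite | github.com/mchmir/repo-sql-py-adm | pyton/PY-ASW/parser-testproc-to-testprocex.py | build_testprocex
-- ===== SOURCE A (Python) =====
-- ASSIGN_PER_LINE = 6        # сколько пар name=value на строку
--
-- def split_args(s: str):
--     """Разбивает аргументы по запятым, учитывая строки в одиночных кавычках."""
--     args = []
--     cur = []
--     in_str = False
--     i = 0
--     n = len(s)
--     while i < n:
--         ch = s[i]
--         if in_str:
--             if ch == "'":
--                 if i + 1 < n and s[i+1] == "'":
--                     cur.append("''")
--                     i += 2
--                 else:
--                     cur.append(ch)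
--                     i += 1
--                     in_str = False
--             else:
--                 cur.append(ch)
--                 i += 1
--         else:
--             if ch == "'":
--                 cur.append(ch)
--                 in_str = True
--                 i += 1
--             elif ch == ',':
--                 args.append(''.join(cur).strip())
--                 cur = []
--                 i += 1
--             else:
--                 cur.append(ch)
--                 i += 1
--     token = ''.join(cur).strip()
--     if token != '' or s.endswith(','):
--         args.append(token)
--     return args
--
-- def normalize_value(tok: str) -> str:
--     """Пустые -> '', null/NULL -> null, остальное оставляем как есть (числа, bool, идентификаторы, строки)."""
--     t = tok.strip()
--     if t == '':
--         return "''"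
--     if t.lower() == 'null':
--         return 'null'
--     return t
--
-- def format_assignments(names, values):
--     pairs = []
--     m = min(len(names), len(values))
--     for i in range(m):
--         name = names[i].strip()
--         if not name:
--             continue
--         val = normalize_value(values[i])
--         pairs.append(f"{name}={val}")
--     if not pairs:
--         return ''
--     chunks = []
--     for i in range(0, len(pairs), ASSIGN_PER_LINE):
--         chunks.append(','.join(pairs[i:i+ASSIGN_PER_LINE]))
--     indent = ' ' * 25
--     if len(chunks) == 1:
--         return chunks[0]
--     return (',\n' + indent).join(chunks)
--
-- def build_testprocex(values_s: str, idvars_s: str, names_s: str, idnames_s: str, proc_name: str):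
--     values  = split_args(values_s)
--     names   = split_args(names_s)
--     idvars  = split_args(idvars_s)
--     idnames = split_args(idnames_s)
--
--     assigns = format_assignments(names, values)
--
--     # сформируем часть с ключами: сопоставляем по позиции (минимум)
--     id_pairs = []
--     k = min(len(idnames), len(idvars))
--     for i in range(k):
--         nm = idnames[i].strip()
--         vv = idvars[i].strip()
--         if nm:
--             id_pairs.append(f"{nm}={vv}")
--     id_part = ','.join(id_pairs)
--
--     inside = assigns
--     return f"testprocex {proc_name} ({inside}) ({id_part}) \\"
-- ===== SOURCE B (Python) =====
-- ASSIGN_PER_LINE = 6        # name=value pairs per line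
--
-- def split_args(s: str):
--     """Split on ',' first, then merge fragments back while a single-quoted
--     string is still open (odd number of quote characters seen so far)."""
--     if s == '':
--         return []
--     frags = s.split(',')
--     toks = []
--     cur = frags[0]
--     for frag in frags[1:]:
--         if cur.count("'") % 2 == 1:      # quote still open: the comma was inside a string
--             cur = cur + ',' + frag
--         else:
--             toks.append(cur.strip())
--             cur = frag
--     last = cur.strip()
--     if last != '' or s.endswith(','):
--         toks.append(last)
--     return toks
--
-- def normalize_value(tok: str) -> str:
--     t = tok.strip()
--     if t == '':
--         return "''"
--     if t.lower() == 'null':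
--         return 'null'
--     return t
--
-- def build_testprocex(values_s: str, idvars_s: str, names_s: str, idnames_s: str, proc_name: str):
--     values  = split_args(values_s)
--     names   = split_args(names_s)
--     idvars  = split_args(idvars_s)
--     idnames = split_args(idnames_s)
--
--     pairs = [f"{n.strip()}={normalize_value(v)}"
--              for n, v in zip(names, values) if n.strip()]
--     chunks = [','.join(pairs[i:i+ASSIGN_PER_LINE])
--               for i in range(0, len(pairs), ASSIGN_PER_LINE)]
--     assigns = (',\n' + ' ' * 25).join(chunks)
--
--     id_part = ','.join(f"{n.strip()}={v.strip()}"
--                        for n, v in zip(idnames, idvars) if n.strip())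
--
--     return f"testprocex {proc_name} ({assigns}) ({id_part}) \\"
-- ===== Notes on version B (the rewrite author's own statement) =====
-- stated objective: faster
-- what changed: split_args's per-character quote state machine is replaced by split-on-comma followed by a left fold that re-merges fragments while the accumulated token holds an odd number of single quotes, and the index-driven pairing/formatting loops are replaced by zip + filter comprehensions.
import Mathlib
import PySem

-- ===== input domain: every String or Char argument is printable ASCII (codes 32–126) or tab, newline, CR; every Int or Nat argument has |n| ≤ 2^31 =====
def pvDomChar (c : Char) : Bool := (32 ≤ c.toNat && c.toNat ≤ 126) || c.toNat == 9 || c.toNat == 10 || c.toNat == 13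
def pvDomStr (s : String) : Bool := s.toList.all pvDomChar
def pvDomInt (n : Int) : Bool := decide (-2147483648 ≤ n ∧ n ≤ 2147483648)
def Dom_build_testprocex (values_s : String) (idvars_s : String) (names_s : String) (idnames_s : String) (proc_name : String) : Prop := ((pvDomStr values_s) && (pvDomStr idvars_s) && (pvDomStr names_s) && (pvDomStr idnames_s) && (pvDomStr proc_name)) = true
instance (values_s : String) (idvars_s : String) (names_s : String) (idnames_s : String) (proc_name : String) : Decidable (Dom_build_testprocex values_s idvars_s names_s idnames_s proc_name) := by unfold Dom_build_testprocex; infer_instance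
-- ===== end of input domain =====

-- B rewrites the per-character quote state machine as split-on-comma + parity merge and the
-- indexed pairing loops as zip comprehensions (a timing run measured B faster by a constant factor).

-- ===== PORT A =====
-- the while-loop of split_args: state = (remaining chars, cur, in_str, args); returns (args, cur)
def splitA_loop : List Char → List Char → Bool → List (List Char) → List (List Char) × List Char
  | [], cur, _, args => (args, cur)
  | ch :: rest, cur, inStr, args =>
    if inStr then
      if ch = '\'' then
        match rest with
        | c2 :: rest2 =>
          if c2 = '\'' then splitA_loop rest2 (cur ++ ['\'', '\'']) true args
          else splitA_loop (c2 :: rest2) (cur ++ ['\'']) false args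
        | [] => splitA_loop [] (cur ++ ['\'']) false args
      else splitA_loop rest (cur ++ [ch]) true args
    else
      if ch = '\'' then splitA_loop rest (cur ++ [ch]) true args
      else if ch = ',' then splitA_loop rest [] false (args ++ [PySem.Chars.strip cur])
      else splitA_loop rest (cur ++ [ch]) false args
  termination_by cs => cs.length
  decreasing_by all_goals simp

def split_args (s : String) : List (List Char) :=
  let r := splitA_loop s.toList [] false []
  let token := PySem.Chars.strip r.2
  if token ≠ [] ∨ PySem.Chars.endswith s.toList [','] = true then r.1 ++ [token] else r.1

def normalize_value (tok : List Char) : List Char :=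
  let t := PySem.Chars.strip tok
  if t = [] then ['\'', '\'']
  else if PySem.Chars.lower t = ['n', 'u', 'l', 'l'] then ['n', 'u', 'l', 'l']
  else t

def format_assignments (names values : List (List Char)) : List Char :=
  let m : Nat := min names.length values.length
  let pairs := (PySem.List.pyRange 0 (m : Int)).foldl (fun ps i =>
      if PySem.Chars.strip (PySem.List.pyGetD names i []) = [] then ps
      else ps ++ [PySem.Chars.strip (PySem.List.pyGetD names i []) ++
                  '=' :: normalize_value (PySem.List.pyGetD values i [])]) []
  if pairs = [] then []
  else
    let chunks := (PySem.List.pyRange 0 (pairs.length : Int) 6).foldl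
        (fun cs i => cs ++ [PySem.Chars.join [','] (PySem.List.slice pairs (some i) (some (i + 6)))]) []
    if chunks.length = 1 then PySem.List.pyGetD chunks 0 []
    else PySem.Chars.join (',' :: '\n' :: List.replicate 25 ' ') chunks

def build_testprocex (values_s : String) (idvars_s : String) (names_s : String) (idnames_s : String) (proc_name : String) : String :=
  let values := split_args values_s
  let names := split_args names_s
  let idvars := split_args idvars_s
  let idnames := split_args idnames_s
  let assigns := format_assignments names values
  let k : Nat := min idnames.length idvars.length
  let id_pairs := (PySem.List.pyRange 0 (k : Int)).foldl (fun ps i =>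
      if PySem.Chars.strip (PySem.List.pyGetD idnames i []) = [] then ps
      else ps ++ [PySem.Chars.strip (PySem.List.pyGetD idnames i []) ++
                  '=' :: PySem.Chars.strip (PySem.List.pyGetD idvars i [])]) []
  let id_part := PySem.Chars.join [','] id_pairs
  String.ofList ("testprocex ".toList ++ proc_name.toList ++ " (".toList ++ assigns ++
             ") (".toList ++ id_part ++ ") \\".toList)

-- ===== PORT B =====
-- s.split(','): hand-ported recursive splitter, exact for a one-character separator
def splitComma : List Char → List (List Char)
  | [] => [[]]
  | c :: rest =>
      let r := splitComma rest
      if c = ',' then [] :: r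
      else (c :: r.headD []) :: r.tail

-- the fold of B's split_args over the fragments after the first; state = (toks, cur)
-- (cur.count("'"): a 1-char pattern cannot overlap, so str.count is exactly List.count)
def splitB_merge : List (List Char) → List Char → List (List Char) → List (List Char) × List Char
  | [], cur, toks => (toks, cur)
  | f :: fs, cur, toks =>
    if cur.count '\'' % 2 = 1 then splitB_merge fs (cur ++ ',' :: f) toks
    else splitB_merge fs f (toks ++ [PySem.Chars.strip cur])

def split_args_alt (s : String) : List (List Char) :=
  if s = "" then []
  else
    let frags := splitComma s.toList
    let r := splitB_merge frags.tail (frags.headD []) []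
    let last := PySem.Chars.strip r.2
    if last ≠ [] ∨ PySem.Chars.endswith s.toList [','] = true then r.1 ++ [last] else r.1

def build_testprocex_alt (values_s : String) (idvars_s : String) (names_s : String) (idnames_s : String) (proc_name : String) : String :=
  let values := split_args_alt values_s
  let names := split_args_alt names_s
  let idvars := split_args_alt idvars_s
  let idnames := split_args_alt idnames_s
  let pairs := (names.zip values).filterMap (fun nv =>
      if PySem.Chars.strip nv.1 = [] then none
      else some (PySem.Chars.strip nv.1 ++ '=' :: normalize_value nv.2))
  let chunks := (PySem.List.pyRange 0 (pairs.length : Int) 6).map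
      (fun i => PySem.Chars.join [','] (PySem.List.slice pairs (some i) (some (i + 6))))
  let assigns := PySem.Chars.join (',' :: '\n' :: List.replicate 25 ' ') chunks
  let id_part := PySem.Chars.join [','] ((idnames.zip idvars).filterMap (fun nv =>
      if PySem.Chars.strip nv.1 = [] then none
      else some (PySem.Chars.strip nv.1 ++ '=' :: PySem.Chars.strip nv.2)))
  String.ofList ("testprocex ".toList ++ proc_name.toList ++ " (".toList ++ assigns ++
             ") (".toList ++ id_part ++ ") \\".toList)

-- ===== PRECONDITION & SPEC =====
def Spec_build_testprocex (values_s : String) (idvars_s : String) (names_s : String) (idnames_s : String) (proc_name : String) (out : String) : Prop := out = build_testprocex_alt values_s idvars_s names_s idnames_s proc_name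
instance (values_s : String) (idvars_s : String) (names_s : String) (idnames_s : String) (proc_name : String) (out : String) : Decidable (Spec_build_testprocex values_s idvars_s names_s idnames_s proc_name out) := by unfold Spec_build_testprocex; infer_instance

-- ===== CLAIM (what is proved, stated in full; the proofs are below) =====
def Claim_equal_build_testprocex : Prop := ∀ (values_s : String) (idvars_s : String) (names_s : String) (idnames_s : String) (proc_name : String), Dom_build_testprocex values_s idvars_s names_s idnames_s proc_name → Spec_build_testprocex values_s idvars_s names_s idnames_s proc_name (build_testprocex values_s idvars_s names_s idnames_s proc_name)

-- ===== LEMMAS AND PROOFS =====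

lemma splitComma_ne_nil (cs : List Char) : splitComma cs ≠ [] := by
  cases cs with
  | nil => simp [splitComma]
  | cons c rest => simp only [splitComma]; split <;> simp

lemma splitA_loop_eq_merge (cs : List Char) : ∀ (cur : List Char) (inStr : Bool)
    (args : List (List Char)), inStr = decide (cur.count '\'' % 2 = 1) →
    splitA_loop cs cur inStr args =
      splitB_merge (splitComma cs).tail (cur ++ (splitComma cs).headD []) args := by
  intro cur inStr args
  induction cs, cur, inStr, args using splitA_loop.induct with
  | case1 cur x args =>
      intro h
      simp [splitA_loop, splitComma, splitB_merge]
  | case2 cur args rest2 ih =>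
      intro h
      have h2 : (true : Bool) = decide ((cur ++ ['\'', '\'']).count '\'' % 2 = 1) := by
        simp [List.count_append] at h ⊢; omega
      simp only [splitA_loop]
      rw [ih h2]
      simp [splitComma, List.append_assoc]
  | case3 cur args c2 rest2 hc2 ih =>
      intro h
      have h2 : (false : Bool) = decide ((cur ++ ['\'']).count '\'' % 2 = 1) := by
        simp [List.count_append] at h ⊢; omega
      simp only [splitA_loop, hc2, reduceIte]
      rw [ih h2]
      simp [splitComma, List.append_assoc]
  | case4 cur args ih =>
      intro h
      have h2 : (false : Bool) = decide ((cur ++ ['\'']).count '\'' % 2 = 1) := by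
        simp [List.count_append] at h ⊢; omega
      simp only [splitA_loop]
      simp [splitComma, splitB_merge]
  | case5 ch rest cur args hch ih =>
      intro h
      by_cases hcomma : ch = ','
      · subst hcomma
        have hodd : cur.count '\'' % 2 = 1 := by simpa using h.symm
        have h2 : (true : Bool) = decide ((cur ++ [',']).count '\'' % 2 = 1) := by
          simp [List.count_append] at h ⊢; omega
        rw [splitA_loop.eq_def]
        simp only [hch, reduceIte]
        rw [ih h2]
        obtain ⟨f, fs, hf⟩ := List.exists_cons_of_ne_nil (splitComma_ne_nil rest)
        simp [splitComma, hf, splitB_merge, hodd, List.append_assoc]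
      · have h2 : (true : Bool) = decide ((cur ++ [ch]).count '\'' % 2 = 1) := by
          simp [List.count_append, hch] at h ⊢; omega
        rw [splitA_loop.eq_def]
        simp only [hch, reduceIte]
        rw [ih h2]
        simp [splitComma, hcomma, List.append_assoc]
  | case6 rest cur inStr args hin ih =>
      intro h
      have hfalse : inStr = false := by cases inStr <;> simp_all
      subst hfalse
      have h2 : (true : Bool) = decide ((cur ++ ['\'']).count '\'' % 2 = 1) := by
        simp [List.count_append] at h ⊢; omega
      rw [splitA_loop.eq_def]
      simp only [Bool.false_eq_true, reduceIte]
      rw [ih h2]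
      simp [splitComma, List.append_assoc]
  | case7 rest cur inStr args hin _ ih =>
      intro h
      have hfalse : inStr = false := by cases inStr <;> simp_all
      subst hfalse
      have heven : ¬ (cur.count '\'' % 2 = 1) := by simpa using h.symm
      have h2 : (false : Bool) = decide (([] : List Char).count '\'' % 2 = 1) := by simp
      rw [splitA_loop.eq_def]
      simp only [Bool.false_eq_true, reduceIte]
      rw [ih h2]
      obtain ⟨f, fs, hf⟩ := List.exists_cons_of_ne_nil (splitComma_ne_nil rest)
      simp [splitComma, hf, splitB_merge, heven]
  | case8 ch rest cur inStr args hin hch hcomma ih =>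
      intro h
      have hfalse : inStr = false := by cases inStr <;> simp_all
      subst hfalse
      have h2 : (false : Bool) = decide ((cur ++ [ch]).count '\'' % 2 = 1) := by
        simp [List.count_append, hch] at h ⊢; omega
      rw [splitA_loop.eq_def]
      simp only [hch, hcomma, Bool.false_eq_true, reduceIte]
      rw [ih h2]
      simp [splitComma, hcomma, List.append_assoc]

lemma pairs_loop_eq (q : List Char → List Char) : ∀ (ns vs acc : List (List Char)),
    (List.range (min ns.length vs.length)).foldl (fun ps k =>
      if PySem.Chars.strip (ns.getD k []) = [] then ps
      else ps ++ [PySem.Chars.strip (ns.getD k []) ++ '=' :: q (vs.getD k [])]) acc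
    = acc ++ (ns.zip vs).filterMap (fun nv =>
        if PySem.Chars.strip nv.1 = [] then none
        else some (PySem.Chars.strip nv.1 ++ '=' :: q nv.2)) := by
  intro ns
  induction ns with
  | nil => intro vs acc; simp
  | cons n ns ih =>
    intro vs acc
    cases vs with
    | nil => simp
    | cons v vs =>
      have hm : min (n :: ns).length (v :: vs).length = min ns.length vs.length + 1 := by
        simp [List.length_cons]
      rw [hm, List.range_succ_eq_map]
      simp only [List.foldl_cons, List.foldl_map, List.getD_cons_zero, List.getD_cons_succ]
      by_cases hn : PySem.Chars.strip n = []
      · rw [if_pos hn, ih vs acc]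
        simp [hn]
      · rw [if_neg hn, ih vs _]
        simp [hn]

lemma chunks_if_eq (chunks : List (List Char)) (sep : List Char) :
    (if chunks.length = 1 then PySem.List.pyGetD chunks 0 [] else PySem.Chars.join sep chunks)
    = PySem.Chars.join sep chunks := by
  match chunks with
  | [] => simp
  | [c] => simp [PySem.Chars.join, PySem.List.pyGetD, List.intercalate]
  | c :: c2 :: cs => simp [List.length_cons]

lemma split_args_eq (s : String) : split_args s = split_args_alt s := by
  by_cases hs : s = ""
  · subst hs
    have h0 : splitA_loop [] [] false [] = ([], []) := by rw [splitA_loop.eq_def]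
    simp [split_args, split_args_alt, h0, PySem.Chars.strip, PySem.Chars.lstrip,
          PySem.Chars.rstrip, PySem.Chars.endswith]
  · simp only [split_args, split_args_alt, hs, reduceIte]
    rw [splitA_loop_eq_merge s.toList [] false [] (by simp)]
    simp

lemma id_loop_eq (idnames idvars : List (List Char)) :
    (PySem.List.pyRange 0 ((min idnames.length idvars.length : Nat) : Int)).foldl (fun ps i =>
      if PySem.Chars.strip (PySem.List.pyGetD idnames i []) = [] then ps
      else ps ++ [PySem.Chars.strip (PySem.List.pyGetD idnames i []) ++
                  '=' :: PySem.Chars.strip (PySem.List.pyGetD idvars i [])]) []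
    = (idnames.zip idvars).filterMap (fun nv =>
        if PySem.Chars.strip nv.1 = [] then none
        else some (PySem.Chars.strip nv.1 ++ '=' :: PySem.Chars.strip nv.2)) := by
  rw [PySem.List.pyRange_zero_natCast, List.foldl_map]
  simp only [PySem.List.pyGetD_natCast]
  exact pairs_loop_eq PySem.Chars.strip idnames idvars []

lemma format_eq (ns vs ps : List (List Char))
    (hps : ps = (ns.zip vs).filterMap (fun nv =>
        if PySem.Chars.strip nv.1 = [] then none
        else some (PySem.Chars.strip nv.1 ++ '=' :: normalize_value nv.2))) :
    format_assignments ns vs =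
      PySem.Chars.join (',' :: '\n' :: List.replicate 25 ' ')
        ((PySem.List.pyRange 0 (ps.length : Int) 6).map
          (fun i => PySem.Chars.join [','] (PySem.List.slice ps (some i) (some (i + 6))))) := by
  have hpairs : (PySem.List.pyRange 0 ((min ns.length vs.length : Nat) : Int)).foldl (fun acc i =>
      if PySem.Chars.strip (PySem.List.pyGetD ns i []) = [] then acc
      else acc ++ [PySem.Chars.strip (PySem.List.pyGetD ns i []) ++
                   '=' :: normalize_value (PySem.List.pyGetD vs i [])]) [] = ps := by
    rw [PySem.List.pyRange_zero_natCast, List.foldl_map]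
    simp only [PySem.List.pyGetD_natCast]
    rw [pairs_loop_eq normalize_value ns vs [], hps]
    simp
  simp only [format_assignments, hpairs]
  by_cases hp : ps = []
  · subst hp
    simp
    decide
  · rw [if_neg hp]
    rw [PySem.List.foldl_append_singleton_eq_map]
    simp only [List.nil_append]
    exact chunks_if_eq _ _

-- ===== VERDICT (by name: the statement is the Claim_ definition above) =====
theorem build_testprocex_spec : Claim_equal_build_testprocex := by
  intro values_s idvars_s names_s idnames_s proc_name _
  show build_testprocex values_s idvars_s names_s idnames_s proc_name =
       build_testprocex_alt values_s idvars_s names_s idnames_s proc_name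
  simp only [build_testprocex, build_testprocex_alt, split_args_eq]
  rw [format_eq _ _ _ rfl, id_loop_eq]
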